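-- pv_equiv track=rewrite | github.com/ToxikSkrrt/COURS | Fac/L2/Premier semestre/Combi, Proba, Stats/TM 2/tm2_solutions.py | EstDyck
-- ===== SOURCE A (Python) =====
-- def EstDyck(s):
--     h = 0
--     n = len(s)
--     for i in range(n):
--         if s[i]==1:
--             h += 1
--         elif s[i]==0:
--             h -= 1
--         else:
--             return False
--         if h<0:
--             return False
--     return (h==0)
-- ===== SOURCE B (Python) =====
-- def EstDyck(s):
--     # Stack-based matched-pair cancellation: a 1 pushes; a 0 cancels the
--     # nearest unmatched 1 (pops it), or is recorded as an unmatched 0.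
--     # The word is a Dyck path iff everything cancels, i.e. the stack ends empty.
--     stack = []
--     for x in s:
--         if x == 1:
--             stack.append(1)
--         elif x == 0:
--             if stack and stack[-1] == 1:
--                 stack.pop()
--             else:
--                 stack.append(0)
--         else:
--             return False
--     return not stack
-- ===== Notes on version B (the rewrite author's own statement) =====
-- stated objective: alternative
-- what changed: Replaced the running-height integer counter with stack-based matched-pair cancellation: each 1 is pushed, each 0 pops its matching 1 (or is pushed as an unmatched 0), and the word is Dyck iff the stack ends empty.
import Mathlib
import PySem

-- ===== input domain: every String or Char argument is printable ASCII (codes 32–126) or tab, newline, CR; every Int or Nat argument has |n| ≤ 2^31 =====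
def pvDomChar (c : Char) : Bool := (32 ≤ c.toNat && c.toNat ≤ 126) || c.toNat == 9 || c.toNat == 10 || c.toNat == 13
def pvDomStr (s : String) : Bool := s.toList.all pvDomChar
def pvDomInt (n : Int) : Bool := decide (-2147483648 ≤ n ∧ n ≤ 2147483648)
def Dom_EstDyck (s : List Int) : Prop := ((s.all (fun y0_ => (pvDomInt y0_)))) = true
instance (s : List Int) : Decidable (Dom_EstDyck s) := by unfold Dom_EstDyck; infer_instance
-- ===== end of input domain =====

-- B replaces A's running-height counter with a stack of matched-pair cancellation (alternative; same O(n) cost).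


-- ===== PORT A =====
-- A's loop with early returns, as structural recursion over the remaining list with the running height h.
def EstDyckGo (h : Int) : List Int → Bool
  | [] => h == 0
  | x :: rest =>
    if x == 1 then
      (if h + 1 < 0 then false else EstDyckGo (h + 1) rest)
    else if x == 0 then
      (if h - 1 < 0 then false else EstDyckGo (h - 1) rest)
    else false

def EstDyck (s : List Int) : Bool := EstDyckGo 0 s

-- ===== PORT B =====
-- Source B's loop: the stack (top = head), 1 pushes, 0 pops a matching 1 or is pushed unmatched.
def EstDyckAltGo (stack : List Int) : List Int → Bool
  | [] => stack.isEmpty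
  | x :: rest =>
    if x == 1 then EstDyckAltGo (1 :: stack) rest
    else if x == 0 then
      (if stack.head? == some 1 then EstDyckAltGo stack.tail rest
       else EstDyckAltGo (0 :: stack) rest)
    else false

def EstDyck_alt (s : List Int) : Bool := EstDyckAltGo [] s

-- ===== PRECONDITION & SPEC =====
def Spec_EstDyck (s : List Int) (out : Bool) : Prop := out = EstDyck_alt s
instance (s : List Int) (out : Bool) : Decidable (Spec_EstDyck s out) := by unfold Spec_EstDyck; infer_instance

-- ===== CLAIM (what is proved, stated in full; the proofs are below) =====
def Claim_equal_EstDyck : Prop := ∀ (s : List Int), Dom_EstDyck s → Spec_EstDyck s (EstDyck s)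

-- ===== LEMMAS AND PROOFS =====

-- an unmatched 0 is never popped: once a 0 is on the stack, B ends with a nonempty stack (or hits a bad element)
theorem altGo_dead (rest : List Int) : ∀ stack : List Int, (0:Int) ∈ stack →
    EstDyckAltGo stack rest = false := by
  induction rest with
  | nil =>
    intro stack h
    simp [EstDyckAltGo, List.isEmpty_eq_false_iff.mpr (List.ne_nil_of_mem h)]
  | cons x rest ih =>
    intro stack h
    by_cases hx1 : x = 1
    · simpa [EstDyckAltGo, hx1] using ih (1 :: stack) (List.mem_cons_of_mem _ h)
    · by_cases hx0 : x = 0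
      · subst hx0
        cases stack with
        | nil => cases h
        | cons y t =>
          by_cases hy : y = 1
          · subst hy
            have h0t : (0:Int) ∈ t := by
              rcases List.mem_cons.mp h with h' | h'
              · exact absurd h'.symm (by norm_num)
              · exact h'
            simpa [EstDyckAltGo, hx1] using ih t h0t
          · simpa [EstDyckAltGo, hx1, hy] using
              ih (0 :: y :: t) (List.mem_cons_self ..)
      · simp [EstDyckAltGo, hx1, hx0]

-- while no unmatched 0 has appeared, the stack is exactly b copies of 1 and A's height is b
theorem altGo_sync (rest : List Int) : ∀ b : Nat,
    EstDyckAltGo (List.replicate b 1) rest = EstDyckGo (b : Int) rest := by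
  induction rest with
  | nil =>
    intro b
    cases b with
    | zero => simp [EstDyckAltGo, EstDyckGo]
    | succ n => simp [EstDyckAltGo, EstDyckGo, List.replicate]; omega
  | cons x rest ih =>
    intro b
    by_cases hx1 : x = 1
    · subst hx1
      have : (1 : Int) :: List.replicate b 1 = List.replicate (b + 1) 1 := by
        simp [List.replicate_succ]
      rw [EstDyckAltGo, EstDyckGo]
      simp only [this, BEq.rfl, if_pos, if_neg (by omega : ¬ ((b : Int) + 1 < 0))]
      rw [ih (b + 1)]
      norm_num
    · by_cases hx0 : x = 0
      · subst hx0
        cases b with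
        | zero =>
          rw [EstDyckAltGo, EstDyckGo]
          simp only [List.replicate]
          norm_num
          exact altGo_dead rest [0] (by simp)
        | succ b' =>
          have h1 : ¬ (((b' : Int) + 1) - 1 < 0) := by omega
          rw [EstDyckAltGo, EstDyckGo]
          norm_num [List.replicate_succ, h1]
          exact ih b'
      · simp [EstDyckAltGo, EstDyckGo, hx1, hx0]

-- ===== VERDICT (by name: the statement is the Claim_ definition above) =====
theorem EstDyck_spec : Claim_equal_EstDyck := by
  intro s _
  unfold Spec_EstDyck EstDyck EstDyck_alt
  simpa using (altGo_sync s 0).symm
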